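-- pv_equiv track=rewrite | github.com/daniel-reich/ubiquitous-fiesta | n2y4i74e9mFdwHNCi_14.py | get_items_at
-- ===== SOURCE A (Python) =====
-- def get_items_at(arr, par):
--     if arr == []:
--         return []
--     elif len(arr) == 1 and par == "odd":
--             return [arr[0]]
--     elif len(arr) == 1 and par == "even":
--            return []
--     elif len(arr) >= 2:
--         if len(arr) % 2 != 0 and par == "odd":
--            return [arr[0]] + get_items_at(arr[1:], "odd")
--         elif len(arr) % 2 != 0 and par == "even":
--            return [arr[1]] + get_items_at(arr[2:], "even")
--         elif len(arr) % 2 == 0 and par == "even":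
--            return [arr[0]] + get_items_at(arr[1:], "even")
--         elif len(arr) % 2 == 0 and par == "odd":
--            return [arr[1]] + get_items_at(arr[2:], "odd")
-- ===== SOURCE B (Python) =====
-- def get_items_at(arr, par):
--     if arr == []:
--         return []
--     n = len(arr)
--     if par == "odd":
--         start = 0 if n % 2 == 1 else 1
--     elif par == "even":
--         start = 1 if n % 2 == 1 else 0
--     else:
--         return None
--     return [x for i, x in enumerate(arr) if i % 2 == start]
-- ===== Notes on version B (the rewrite author's own statement) =====
-- stated objective: simpler
-- what changed: Replaces A's recursive peel-one-or-two descent (re-checking length parity at every level) with one O(1) start-offset computation from len(arr)'s parity followed by a single pass that keeps the elements whose index has that parity.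
-- outside the precondition, e.g. on get_items_at([1, 2], 'x'): A returns None, B returns None
import Mathlib
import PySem

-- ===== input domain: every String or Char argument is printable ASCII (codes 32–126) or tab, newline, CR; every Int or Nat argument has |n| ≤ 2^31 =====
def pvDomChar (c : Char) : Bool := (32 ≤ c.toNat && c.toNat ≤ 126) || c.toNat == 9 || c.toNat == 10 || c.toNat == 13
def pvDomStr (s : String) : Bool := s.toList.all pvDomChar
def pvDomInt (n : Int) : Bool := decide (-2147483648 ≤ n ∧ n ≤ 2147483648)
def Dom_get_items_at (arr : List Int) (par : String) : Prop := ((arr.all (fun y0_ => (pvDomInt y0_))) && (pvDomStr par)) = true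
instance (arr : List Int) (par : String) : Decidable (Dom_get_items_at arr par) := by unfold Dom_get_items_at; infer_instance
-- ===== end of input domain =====

-- B replaces A's recursive peel-one-or-two descent with one start-offset computation from
-- len(arr)'s parity followed by a single index-parity filter pass (simpler decomposition).


-- ===== PORT A =====
def get_items_at (arr : List Int) (par : String) : List Int :=
  match arr with
  | [] => []
  | [a] =>                                  -- len(arr) == 1
    if par = "odd" then [a]
    else if par = "even" then []
    else []                                 -- Python falls through returning None; excluded by Pre_
  | a :: b :: t =>                          -- len(arr) >= 2
    if (t.length + 2) % 2 ≠ 0 ∧ par = "odd" then a :: get_items_at (b :: t) "odd"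
    else if (t.length + 2) % 2 ≠ 0 ∧ par = "even" then b :: get_items_at t "even"
    else if (t.length + 2) % 2 = 0 ∧ par = "even" then a :: get_items_at (b :: t) "even"
    else if (t.length + 2) % 2 = 0 ∧ par = "odd" then b :: get_items_at t "odd"
    else []                                 -- Python falls through returning None; excluded by Pre_

-- ===== PORT B =====
def get_items_at_alt (arr : List Int) (par : String) : List Int :=
  if arr = [] then []
  else
    let n : Int := arr.length
    let start? : Option Int :=
      if par = "odd" then some (if PySem.Int.mod n 2 = 1 then 0 else 1)
      else if par = "even" then some (if PySem.Int.mod n 2 = 1 then 1 else 0)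
      else none
    match start? with
    | none => []                            -- Python returns None; excluded by Pre_
    | some start =>
      ((PySem.List.enumerate arr 0).filter (fun p => PySem.Int.mod p.1 2 == start)).map (fun p => p.2)

-- ===== PRECONDITION & SPEC =====
-- Pre_ excludes nonempty arr with par not "odd"/"even": there A returns None, not a list.
def Pre_get_items_at (arr : List Int) (par : String) : Prop :=
  arr = [] ∨ par = "odd" ∨ par = "even"
instance (arr : List Int) (par : String) : Decidable (Pre_get_items_at arr par) := by
  unfold Pre_get_items_at; infer_instance
def pvWitness_get_items_at : List Int × String := ([1, 2, 3], "odd")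

def Spec_get_items_at (arr : List Int) (par : String) (out : List Int) : Prop := out = get_items_at_alt arr par
instance (arr : List Int) (par : String) (out : List Int) : Decidable (Spec_get_items_at arr par out) := by unfold Spec_get_items_at; infer_instance

-- ===== CLAIM (what is proved, stated in full; the proofs are below) =====
def Claim_equal_get_items_at : Prop := ∀ (arr : List Int) (par : String), Dom_get_items_at arr par → Pre_get_items_at arr par → Spec_get_items_at arr par (get_items_at arr par)

-- ===== LEMMAS AND PROOFS =====

-- every-other-element pickers, used only to characterise both ports
def eoA : List Int → List Int               -- indices 0, 2, 4, …
  | [] => []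
  | [a] => [a]
  | a :: _ :: t => a :: eoA t

def eoB : List Int → List Int               -- indices 1, 3, 5, …
  | [] => []
  | [_] => []
  | _ :: b :: t => b :: eoB t

-- B's comprehension, with a general enumerate start
def F (b s : Int) (t : List Int) : List Int :=
  ((PySem.List.enumerate t s).filter (fun p => PySem.Int.mod p.1 2 == b)).map (fun p => p.2)

theorem F_nil (b s : Int) : F b s [] = [] := by
  simp [F, PySem.List.enumerate_nil]

theorem F_cons (b s : Int) (a : Int) (t : List Int) :
    F b s (a :: t) = if PySem.Int.mod s 2 = b then a :: F b (s + 1) t else F b (s + 1) t := by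
  simp only [F, PySem.List.enumerate_cons, List.filter_cons]
  split_ifs with h <;> simp_all

theorem eoB_cons (x : Int) (t : List Int) : eoB (x :: t) = eoA t := by
  induction t using eoA.induct generalizing x with
  | case1 => rfl
  | case2 a => rfl
  | case3 a b t ih =>
    have h1 : eoB (x :: a :: b :: t) = a :: eoB (b :: t) := rfl
    have h2 : eoA (a :: b :: t) = a :: eoA t := rfl
    rw [h1, h2, ih b]

theorem F_eo (t : List Int) : ∀ s : Int, 0 ≤ s → s % 2 = 0 → F 0 s t = eoA t ∧ F 1 s t = eoB t := by
  induction t using eoA.induct with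
  | case1 => intro s _ _; simp [F_nil, eoA, eoB]
  | case2 a =>
    intro s hs h2
    have hm : PySem.Int.mod s 2 = s % 2 := PySem.Int.mod_eq_emod_of_pos (by omega)
    constructor
    · rw [F_cons, hm, h2, if_pos rfl, F_nil]; rfl
    · rw [F_cons, hm, h2, if_neg (by norm_num), F_nil]; rfl
  | case3 a b t ih =>
    intro s hs h2
    have hm : PySem.Int.mod s 2 = s % 2 := PySem.Int.mod_eq_emod_of_pos (by omega)
    have hm1 : PySem.Int.mod (s + 1) 2 = (s + 1) % 2 := PySem.Int.mod_eq_emod_of_pos (by omega)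
    have e2 : s + 1 + 1 = s + 2 := by ring
    obtain ⟨ihA, ihB⟩ := ih (s + 2) (by omega) (by omega)
    constructor
    · rw [F_cons, hm, h2, if_pos rfl, F_cons, hm1, if_neg (by omega), e2, ihA]; rfl
    · rw [F_cons, hm, h2, if_neg (by norm_num), F_cons, hm1, if_pos (by omega), e2, ihB]; rfl

theorem A_eo (n : Nat) : ∀ arr : List Int, arr.length ≤ n →
    (get_items_at arr "odd" = if arr.length % 2 = 1 then eoA arr else eoB arr) ∧
    (get_items_at arr "even" = if arr.length % 2 = 1 then eoB arr else eoA arr) := by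
  induction n with
  | zero =>
    intro arr h
    have : arr = [] := List.eq_nil_of_length_eq_zero (by omega)
    subst this; simp [get_items_at, eoA, eoB]
  | succ n ih =>
    intro arr h
    match arr with
    | [] => simp [get_items_at, eoA, eoB]
    | [a] => simp [get_items_at, eoA, eoB]
    | a :: b :: t =>
      have hbt : (b :: t).length ≤ n := by simp at h ⊢; omega
      have ht : t.length ≤ n := by simp at h ⊢; omega
      obtain ⟨ih1o, ih1e⟩ := ih (b :: t) hbt
      obtain ⟨ih2o, ih2e⟩ := ih t ht
      have hlb : (b :: t).length % 2 = (t.length + 1) % 2 := by simp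
      have hlt : (a :: b :: t).length % 2 = (t.length + 2) % 2 := by simp; omega
      by_cases hp : t.length % 2 = 1
      · have hne : (t.length + 2) % 2 ≠ 0 := by omega
        constructor
        · show (if (t.length + 2) % 2 ≠ 0 ∧ ("odd" : String) = "odd" then a :: get_items_at (b :: t) "odd"
                else if (t.length + 2) % 2 ≠ 0 ∧ ("odd" : String) = "even" then b :: get_items_at t "even"
                else if (t.length + 2) % 2 = 0 ∧ ("odd" : String) = "even" then a :: get_items_at (b :: t) "even"
                else if (t.length + 2) % 2 = 0 ∧ ("odd" : String) = "odd" then b :: get_items_at t "odd"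
                else []) = _
          rw [if_pos ⟨hne, rfl⟩, ih1o, if_neg (by rw [hlb]; omega), eoB_cons, if_pos (by rw [hlt]; omega)]
          rfl
        · show (if (t.length + 2) % 2 ≠ 0 ∧ ("even" : String) = "odd" then a :: get_items_at (b :: t) "odd"
                else if (t.length + 2) % 2 ≠ 0 ∧ ("even" : String) = "even" then b :: get_items_at t "even"
                else if (t.length + 2) % 2 = 0 ∧ ("even" : String) = "even" then a :: get_items_at (b :: t) "even"
                else if (t.length + 2) % 2 = 0 ∧ ("even" : String) = "odd" then b :: get_items_at t "odd"
                else []) = _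
          rw [if_neg (by simp), if_pos ⟨hne, rfl⟩, ih2e, if_pos hp, if_pos (by rw [hlt]; omega)]
          rfl
      · have he : (t.length + 2) % 2 = 0 := by omega
        constructor
        · show (if (t.length + 2) % 2 ≠ 0 ∧ ("odd" : String) = "odd" then a :: get_items_at (b :: t) "odd"
                else if (t.length + 2) % 2 ≠ 0 ∧ ("odd" : String) = "even" then b :: get_items_at t "even"
                else if (t.length + 2) % 2 = 0 ∧ ("odd" : String) = "even" then a :: get_items_at (b :: t) "even"
                else if (t.length + 2) % 2 = 0 ∧ ("odd" : String) = "odd" then b :: get_items_at t "odd"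
                else []) = _
          rw [if_neg (by simp [he]), if_neg (by simp), if_neg (by simp), if_pos ⟨he, rfl⟩,
              ih2o, if_neg (by omega), if_neg (by rw [hlt]; omega)]
          rfl
        · show (if (t.length + 2) % 2 ≠ 0 ∧ ("even" : String) = "odd" then a :: get_items_at (b :: t) "odd"
                else if (t.length + 2) % 2 ≠ 0 ∧ ("even" : String) = "even" then b :: get_items_at t "even"
                else if (t.length + 2) % 2 = 0 ∧ ("even" : String) = "even" then a :: get_items_at (b :: t) "even"
                else if (t.length + 2) % 2 = 0 ∧ ("even" : String) = "odd" then b :: get_items_at t "odd"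
                else []) = _
          rw [if_neg (by simp), if_neg (by simp [he]), if_pos ⟨he, rfl⟩, ih1e,
              if_pos (by rw [hlb]; omega), eoB_cons, if_neg (by rw [hlt]; omega)]
          rfl

-- ===== VERDICT (by name: the statement is the Claim_ definition above) =====
theorem get_items_at_spec : Claim_equal_get_items_at := by
  intro arr par hdom hpre
  unfold Spec_get_items_at
  obtain ⟨hAo, hAe⟩ := A_eo arr.length arr le_rfl
  obtain ⟨hF0, hF1⟩ := F_eo arr 0 le_rfl rfl
  have hm : PySem.Int.mod ((arr.length : Int)) 2 = (arr.length : Int) % 2 :=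
    PySem.Int.mod_eq_emod_of_pos (by omega)
  rcases hpre with h | h | h
  · subst h; rfl
  · subst h
    by_cases ha : arr = []
    · subst ha; rfl
    · simp only [get_items_at_alt]
      rw [if_neg ha, if_pos trivial, hm]
      by_cases hp : arr.length % 2 = 1
      · have hi : ((arr.length : Int)) % 2 = 1 := by omega
        rw [if_pos hi, hAo, if_pos hp]
        exact hF0.symm
      · have hi : ¬ ((arr.length : Int)) % 2 = 1 := by omega
        rw [if_neg hi, hAo, if_neg hp]
        exact hF1.symm
  · subst h
    by_cases ha : arr = []
    · subst ha; rfl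
    · simp only [get_items_at_alt]
      have hso : ¬(("even" : String) = "odd") := by decide
      rw [if_neg ha, if_neg hso, if_pos trivial, hm]
      by_cases hp : arr.length % 2 = 1
      · have hi : ((arr.length : Int)) % 2 = 1 := by omega
        rw [if_pos hi, hAe, if_pos hp]
        exact hF1.symm
      · have hi : ¬ ((arr.length : Int)) % 2 = 1 := by omega
        rw [if_neg hi, hAe, if_neg hp]
        exact hF0.symm
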